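-- pv_equiv track=rewrite | github.com/itay99988/Utility-Based-Learning | utility_based.py | compatible_test_rec
-- ===== SOURCE A (Python) =====
-- def compatible_test_rec(p1, p2, actions, acceptance_dict):
--     if acceptance_dict[p1] == -1 or acceptance_dict[p2] == -1:
--         return True
--
--     if acceptance_dict[p1] != acceptance_dict[p2]:
--         return False
--
--     for act in actions:
--         if not compatible_test_rec(p1 + act, p2 + act, actions, acceptance_dict):
--             return False
--
--     return True
-- ===== SOURCE B (Python) =====
-- def compatible_test_rec(p1, p2, actions, acceptance_dict):
--     # breadth-first search: expand the whole frontier of prefix pairs level by level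
--     frontier = [(p1, p2)]
--     while frontier:
--         nxt = []
--         for a, b in frontier:
--             va = acceptance_dict[a]
--             vb = acceptance_dict[b]
--             if va == -1 or vb == -1:
--                 continue
--             if va != vb:
--                 return False
--             for act in actions:
--                 nxt.append((a + act, b + act))
--         frontier = nxt
--     return True
-- ===== Notes on version B (the rewrite author's own statement) =====
-- stated objective: alternative
-- what changed: Replaces A's depth-first recursion (with short-circuited 'or' lookups) by an iterative breadth-first search that expands the whole frontier of prefix pairs level by level, evaluating both dictionary lookups of a pair up front.
-- outside the precondition, e.g. on compatible_test_rec('a', 'b', ['x'], {'a': -1}): A returns True, B raises KeyError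
import Mathlib
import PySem

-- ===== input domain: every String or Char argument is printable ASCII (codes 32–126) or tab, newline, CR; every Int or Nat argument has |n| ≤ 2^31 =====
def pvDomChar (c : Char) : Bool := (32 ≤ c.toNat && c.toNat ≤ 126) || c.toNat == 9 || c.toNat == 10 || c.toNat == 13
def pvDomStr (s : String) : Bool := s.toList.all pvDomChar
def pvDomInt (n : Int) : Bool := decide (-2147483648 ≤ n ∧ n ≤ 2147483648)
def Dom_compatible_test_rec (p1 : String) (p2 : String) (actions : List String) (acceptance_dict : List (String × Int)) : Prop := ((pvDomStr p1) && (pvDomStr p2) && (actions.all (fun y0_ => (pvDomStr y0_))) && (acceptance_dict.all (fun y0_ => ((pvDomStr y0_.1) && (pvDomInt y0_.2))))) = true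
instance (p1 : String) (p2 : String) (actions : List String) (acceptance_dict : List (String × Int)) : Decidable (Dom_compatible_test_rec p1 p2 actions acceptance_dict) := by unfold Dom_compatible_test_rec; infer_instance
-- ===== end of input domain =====

-- B replaces A's depth-first recursion by an iterative breadth-first search over a frontier of
-- prefix pairs, evaluating both dictionary lookups of a pair up front; equivalence is claimed on
-- Pre_ (inputs on which both traversals complete without a KeyError).

-- first-match association-list lookup: Python's acceptance_dict[k] (none = KeyError)
def pvGet : List (String × Int) → String → Option Int
  | [], _ => none
  | (k, v) :: rest, x => if k = x then some v else pvGet rest x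

-- longest key length in the dict (bounds the depth of any exploration that stays inside the keys)
def pvMaxLen (d : List (String × Int)) : Nat :=
  d.foldr (fun kv m => max kv.1.length m) 0

-- ===== PORT A =====
-- literal transliteration of A's recursion; fuel makes it total in Lean (under Pre_ the fuel is
-- never exhausted and the 'none' KeyError branches are never taken); the short-circuited
-- 'acceptance_dict[p1] == -1 or acceptance_dict[p2] == -1' is kept: p2 is only looked up if needed
def pvARec (actions : List String) (d : List (String × Int)) : Nat → String → String → Bool
  | 0, _, _ => false
  | f + 1, p1, p2 =>
    match pvGet d p1 with
    | none => false
    | some v1 =>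
      if v1 = -1 then true
      else
        match pvGet d p2 with
        | none => false
        | some v2 =>
          if v2 = -1 then true
          else if v1 ≠ v2 then false
          else actions.all (fun act => pvARec actions d f (p1 ++ act) (p2 ++ act))

def compatible_test_rec (p1 : String) (p2 : String) (actions : List String) (acceptance_dict : List (String × Int)) : Bool :=
  pvARec actions acceptance_dict (pvMaxLen acceptance_dict + 2) p1 p2

-- ===== PORT B =====
-- one BFS level: process every pair of the frontier, collecting all their children in order;
-- 'none' = the level returned False or hit a missing key (KeyError, never reached under Pre_)
def pvBLevel (actions : List String) (d : List (String × Int)) : List (String × String) → Option (List (String × String))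
  | [] => some []
  | (a, b) :: rest =>
    match pvGet d a, pvGet d b with
    | some va, some vb =>
      if va = -1 ∨ vb = -1 then pvBLevel actions d rest
      else if va ≠ vb then none
      else
        match pvBLevel actions d rest with
        | none => none
        | some nxt => some (actions.map (fun act => (a ++ act, b ++ act)) ++ nxt)
    | _, _ => none

-- the while-loop over levels; fuel counts levels and is never exhausted under Pre_
def pvBLoop (actions : List String) (d : List (String × Int)) : Nat → List (String × String) → Bool
  | _, [] => true
  | 0, _ :: _ => false
  | f + 1, st =>
    match pvBLevel actions d st with
    | none => false
    | some nxt => pvBLoop actions d f nxt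

def compatible_test_rec_alt (p1 : String) (p2 : String) (actions : List String) (acceptance_dict : List (String × Int)) : Bool :=
  pvBLoop actions acceptance_dict (pvMaxLen acceptance_dict + 2) [(p1, p2)]

-- ===== PRECONDITION & SPEC =====
-- prefix order on strings (child pairs extend the root pair)
def pvPref (a b : String) : Prop := a.toList <+: b.toList

-- Pre_ excludes inputs on which A raises (a missing key in its traversal, or an empty action
-- string making the recursion unbounded) and non-closed dicts on which A's depth-first
-- short-circuited traversal and B's breadth-first both-lookups traversal legitimately diverge
-- (one can return where the other raises KeyError, as the cited examples show): it requires both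
-- roots to be keys and, unless the result is decided at the root (a -1 or a mismatch there),
-- nonempty actions and the dict to contain all action-extensions of its non-(-1) keys that
-- extend either root.
def Pre_compatible_test_rec (p1 : String) (p2 : String) (actions : List String) (acceptance_dict : List (String × Int)) : Prop :=
  p1 ∈ acceptance_dict.map Prod.fst ∧ p2 ∈ acceptance_dict.map Prod.fst ∧
  (pvGet acceptance_dict p1 = some (-1) ∨
   pvGet acceptance_dict p2 = some (-1) ∨
   pvGet acceptance_dict p1 ≠ pvGet acceptance_dict p2 ∨
   ("" ∉ actions ∧
    ∀ kv ∈ acceptance_dict, kv.2 ≠ -1 → (pvPref p1 kv.1 ∨ pvPref p2 kv.1) →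
      ∀ act ∈ actions, kv.1 ++ act ∈ acceptance_dict.map Prod.fst))

instance (p1 : String) (p2 : String) (actions : List String) (acceptance_dict : List (String × Int)) : Decidable (Pre_compatible_test_rec p1 p2 actions acceptance_dict) := by unfold Pre_compatible_test_rec pvPref; infer_instance

def pvWitness_compatible_test_rec : String × String × List String × (List (String × Int)) :=
  ("a", "b", ["x"], [("a", 0), ("b", 0), ("ax", -1), ("bx", -1)])

def Spec_compatible_test_rec (p1 : String) (p2 : String) (actions : List String) (acceptance_dict : List (String × Int)) (out : Bool) : Prop := out = compatible_test_rec_alt p1 p2 actions acceptance_dict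
instance (p1 : String) (p2 : String) (actions : List String) (acceptance_dict : List (String × Int)) (out : Bool) : Decidable (Spec_compatible_test_rec p1 p2 actions acceptance_dict out) := by unfold Spec_compatible_test_rec; infer_instance

-- ===== CLAIM (what is proved, stated in full; the proofs are below) =====
def Claim_equal_compatible_test_rec : Prop := ∀ (p1 : String) (p2 : String) (actions : List String) (acceptance_dict : List (String × Int)), Dom_compatible_test_rec p1 p2 actions acceptance_dict → Pre_compatible_test_rec p1 p2 actions acceptance_dict → Spec_compatible_test_rec p1 p2 actions acceptance_dict (compatible_test_rec p1 p2 actions acceptance_dict)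

-- ===== LEMMAS AND PROOFS =====

theorem pvGet_mem {d : List (String × Int)} {a : String} {v : Int}
    (h : pvGet d a = some v) : (a, v) ∈ d := by
  induction d with
  | nil => simp [pvGet] at h
  | cons kv rest ih =>
    obtain ⟨k, w⟩ := kv
    by_cases hk : k = a
    · subst hk
      simp [pvGet] at h
      simp [h]
    · simp [pvGet, hk] at h
      exact List.mem_cons_of_mem _ (ih h)

theorem pvGet_is_some {d : List (String × Int)} {a : String}
    (h : a ∈ d.map Prod.fst) : ∃ v, pvGet d a = some v := by
  induction d with
  | nil => simp at h
  | cons kv rest ih =>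
    obtain ⟨k, w⟩ := kv
    by_cases hk : k = a
    · exact ⟨w, by simp [pvGet, hk]⟩
    · have h' : a = k ∨ a ∈ rest.map Prod.fst := by simpa using h
      rcases h' with h' | h'
      · exact absurd h'.symm hk
      · obtain ⟨v, hv⟩ := ih h'
        exact ⟨v, by simp [pvGet, hk, hv]⟩

theorem pv_len_le_maxLen {d : List (String × Int)} {a : String}
    (h : a ∈ d.map Prod.fst) : a.length ≤ pvMaxLen d := by
  induction d with
  | nil => simp at h
  | cons kv rest ih =>
    have h' : a = kv.1 ∨ a ∈ rest.map Prod.fst := by simpa using h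
    rcases h' with h' | h'
    · simp [pvMaxLen, List.foldr, h']
    · have := ih h'
      simp only [pvMaxLen, List.foldr] at *
      omega

theorem pv_all_congr {α : Type} {l : List α} {f g : α → Bool}
    (h : ∀ x ∈ l, f x = g x) : l.all f = l.all g := by
  induction l with
  | nil => rfl
  | cons x xs ih =>
    simp only [List.all_cons]
    rw [h x (by simp), ih (fun y hy => h y (by simp [hy]))]

theorem pv_act_len_pos {actions : List String} {act : String}
    (hne : "" ∉ actions) (hmem : act ∈ actions) : 0 < act.length := by
  rcases Nat.eq_zero_or_pos act.length with h0 | h0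
  · exact absurd ((String.length_eq_zero_iff.mp h0) ▸ hmem) hne
  · exact h0

theorem pvPref_refl (a : String) : pvPref a a := List.prefix_refl _

theorem pvPref_append {a b : String} (h : pvPref a b) (c : String) : pvPref a (b ++ c) := by
  unfold pvPref at *
  rw [String.toList_append]
  exact h.trans (List.prefix_append _ _)

-- A's fueled recursion does not depend on the fuel once it exceeds the remaining key depth
theorem pvARec_fuel {P1 P2 : String} {actions : List String} {d : List (String × Int)}
    (hne : "" ∉ actions)
    (hcl : ∀ kv ∈ d, kv.2 ≠ -1 → (pvPref P1 kv.1 ∨ pvPref P2 kv.1) →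
      ∀ act ∈ actions, kv.1 ++ act ∈ d.map Prod.fst) :
    ∀ (n m : Nat) (p1 p2 : String), p1 ∈ d.map Prod.fst → p2 ∈ d.map Prod.fst →
      pvPref P1 p1 → pvPref P2 p2 →
      pvMaxLen d + 1 < n + p1.length → pvMaxLen d + 1 < m + p1.length →
      pvARec actions d n p1 p2 = pvARec actions d m p1 p2 := by
  intro n
  induction n with
  | zero =>
    intro m p1 p2 h1 _ _ _ hn _
    have := pv_len_le_maxLen h1
    omega
  | succ n ih =>
    intro m p1 p2 h1 h2 hp1 hp2 hn hm
    have hl1 := pv_len_le_maxLen h1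
    obtain ⟨m', rfl⟩ : ∃ m', m = m' + 1 := ⟨m - 1, by omega⟩
    simp only [pvARec]
    obtain ⟨v1, hv1⟩ := pvGet_is_some h1
    obtain ⟨v2, hv2⟩ := pvGet_is_some h2
    rw [hv1, hv2]
    by_cases e1 : v1 = -1
    · simp [e1]
    · by_cases e2 : v2 = -1
      · simp [e1, e2]
      · by_cases e12 : v1 = v2
        · simp only [e2, e12, if_neg, ne_eq, not_true_eq_false, not_false_eq_true]
          apply pv_all_congr
          intro act hact
          have hlen := pv_act_len_pos hne hact
          have hc1 : p1 ++ act ∈ d.map Prod.fst :=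
            hcl (p1, v1) (pvGet_mem hv1) e1 (Or.inl hp1) act hact
          have hc2 : p2 ++ act ∈ d.map Prod.fst :=
            hcl (p2, v2) (pvGet_mem hv2) (by rw [← e12]; exact e1) (Or.inr hp2) act hact
          apply ih m' (p1 ++ act) (p2 ++ act) hc1 hc2 (pvPref_append hp1 act)
            (pvPref_append hp2 act) <;> simp [String.length_append] <;> omega
        · simp [e1, e2, e12]

theorem pvARec_succ (actions : List String) (d : List (String × Int)) (f : Nat) (p1 p2 : String) :
    pvARec actions d (f + 1) p1 p2 =
      (match pvGet d p1 with
       | none => false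
       | some v1 =>
         if v1 = -1 then true
         else
           match pvGet d p2 with
           | none => false
           | some v2 =>
             if v2 = -1 then true
             else if v1 ≠ v2 then false
             else actions.all (fun act => pvARec actions d f (p1 ++ act) (p2 ++ act))) := rfl

-- the per-pair property both programs compute: A's value at full fuel
def pvF (actions : List String) (d : List (String × Int)) (p : String × String) : Bool :=
  pvARec actions d (pvMaxLen d + 2) p.1 p.2

-- the frontier invariant: every pair consists of keys extending the respective root
def pvInv (P1 P2 : String) (d : List (String × Int)) (st : List (String × String)) : Prop :=
  ∀ p ∈ st, p.1 ∈ d.map Prod.fst ∧ p.2 ∈ d.map Prod.fst ∧ pvPref P1 p.1 ∧ pvPref P2 p.2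

-- one BFS level computes the conjunction of pvF over the frontier, modulo the next level
theorem pvBLevel_eq {P1 P2 : String} {actions : List String} {d : List (String × Int)}
    (hne : "" ∉ actions)
    (hcl : ∀ kv ∈ d, kv.2 ≠ -1 → (pvPref P1 kv.1 ∨ pvPref P2 kv.1) →
      ∀ act ∈ actions, kv.1 ++ act ∈ d.map Prod.fst) :
    ∀ (st : List (String × String)), pvInv P1 P2 d st →
      match pvBLevel actions d st with
      | none => st.all (pvF actions d) = false
      | some nxt => st.all (pvF actions d) = nxt.all (pvF actions d) ∧ pvInv P1 P2 d nxt ∧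
          ∀ q ∈ nxt, ∃ p ∈ st, ∃ act ∈ actions, q.1 = p.1 ++ act := by
  intro st
  induction st with
  | nil =>
    intro _
    exact ⟨rfl, by intro p hp; simp at hp, by intro q hq; simp at hq⟩
  | cons hd rest ih =>
    intro hinv
    obtain ⟨a, b⟩ := hd
    obtain ⟨ha, hb, hpa, hpb⟩ := hinv (a, b) (by simp)
    have hrest : pvInv P1 P2 d rest := fun p hp => hinv p (by simp [hp])
    obtain ⟨va, hva⟩ := pvGet_is_some ha
    obtain ⟨vb, hvb⟩ := pvGet_is_some hb
    have hFhd : pvF actions d (a, b) = pvARec actions d (pvMaxLen d + 2) a b := rfl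
    by_cases e1 : va = -1 ∨ vb = -1
    · -- skipped pair: its pvF is true
      have hFtrue : pvF actions d (a, b) = true := by
        rcases e1 with e1 | e1 <;>
          simp [pvF, pvARec, hva, hvb, e1]
      have := ih hrest
      simp only [pvBLevel, hva, hvb, if_pos e1]
      cases hlev : pvBLevel actions d rest with
      | none =>
        rw [hlev] at this
        simp [List.all_cons, hFtrue, this]
      | some nxt =>
        rw [hlev] at this
        obtain ⟨heq, hinv', hsrc⟩ := this
        refine ⟨by simp [List.all_cons, hFtrue, heq], hinv', ?_⟩
        intro q hq
        obtain ⟨p, hp, hact⟩ := hsrc q hq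
        exact ⟨p, by simp [hp], hact⟩
    · rw [not_or] at e1
      obtain ⟨e1a, e1b⟩ := e1
      by_cases e12 : va = vb
      · -- expanded pair: pvF equals the conjunction over its children
        have hchild : ∀ act ∈ actions,
            pvARec actions d (pvMaxLen d + 1) (a ++ act) (b ++ act)
              = pvARec actions d (pvMaxLen d + 2) (a ++ act) (b ++ act) := by
          intro act hact
          have hlen := pv_act_len_pos hne hact
          have hal := pv_len_le_maxLen ha
          have hc1 : a ++ act ∈ d.map Prod.fst :=
            hcl (a, va) (pvGet_mem hva) e1a (Or.inl hpa) act hact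
          have hc2 : b ++ act ∈ d.map Prod.fst :=
            hcl (b, vb) (pvGet_mem hvb) (by rw [← e12]; exact e1a) (Or.inr hpb) act hact
          apply pvARec_fuel hne hcl _ _ _ _ hc1 hc2 (pvPref_append hpa act)
            (pvPref_append hpb act) <;> simp [String.length_append] <;> omega
        have hFexp : pvF actions d (a, b)
            = (actions.map (fun act => (a ++ act, b ++ act))).all (pvF actions d) := by
          have step : pvF actions d (a, b)
              = actions.all (fun act =>
                  pvARec actions d (pvMaxLen d + 1) (a ++ act) (b ++ act)) := by
            show pvARec actions d (pvMaxLen d + 1 + 1) a b = _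
            rw [pvARec_succ, hva, hvb]
            simp [e1b, e12]
          rw [step, pv_all_congr hchild, List.all_map]
          rfl
        have := ih hrest
        simp only [pvBLevel, hva, hvb, if_neg (by tauto : ¬(va = -1 ∨ vb = -1)),
          if_neg (by simp [e12] : ¬va ≠ vb)]
        cases hlev : pvBLevel actions d rest with
        | none =>
          rw [hlev] at this
          simp [List.all_cons, this]
        | some nxt =>
          rw [hlev] at this
          obtain ⟨heq, hinv', hsrc⟩ := this
          refine ⟨?_, ?_, ?_⟩
          · simp [List.all_cons, hFexp, heq, List.all_append]
          · intro q hq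
            rcases List.mem_append.mp hq with hq | hq
            · obtain ⟨act, hact, rfl⟩ := List.mem_map.mp hq
              have hc1 : a ++ act ∈ d.map Prod.fst :=
                hcl (a, va) (pvGet_mem hva) e1a (Or.inl hpa) act hact
              have hc2 : b ++ act ∈ d.map Prod.fst :=
                hcl (b, vb) (pvGet_mem hvb) (by rw [← e12]; exact e1a) (Or.inr hpb) act hact
              exact ⟨hc1, hc2, pvPref_append hpa act, pvPref_append hpb act⟩
            · exact hinv' q hq
          · intro q hq
            rcases List.mem_append.mp hq with hq | hq
            · obtain ⟨act, hact, rfl⟩ := List.mem_map.mp hq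
              exact ⟨(a, b), by simp, act, hact, rfl⟩
            · obtain ⟨p, hp, hact⟩ := hsrc q hq
              exact ⟨p, by simp [hp], hact⟩
      · -- mismatching pair: the level returns none and pvF is false
        have hFfalse : pvF actions d (a, b) = false := by
          simp [pvF, pvARec, hva, hvb, e1a, e1b, e12]
        simp only [pvBLevel, hva, hvb, if_neg (by tauto : ¬(va = -1 ∨ vb = -1)),
          if_pos (by simp [e12] : va ≠ vb)]
        simp [List.all_cons, hFfalse]

-- the BFS loop computes the conjunction of pvF over the frontier (given enough fuel)
theorem pvBLoop_eq {P1 P2 : String} {actions : List String} {d : List (String × Int)}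
    (hne : "" ∉ actions)
    (hcl : ∀ kv ∈ d, kv.2 ≠ -1 → (pvPref P1 kv.1 ∨ pvPref P2 kv.1) →
      ∀ act ∈ actions, kv.1 ++ act ∈ d.map Prod.fst) :
    ∀ (f : Nat) (st : List (String × String)), pvInv P1 P2 d st →
      (∀ p ∈ st, pvMaxLen d + 1 < f + p.1.length) →
      pvBLoop actions d f st = st.all (pvF actions d) := by
  intro f
  induction f with
  | zero =>
    intro st hinv hlen
    cases st with
    | nil => simp [pvBLoop]
    | cons p rest =>
      exfalso
      have h1 := (hinv p (by simp)).1
      have h2 := pv_len_le_maxLen h1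
      have h3 := hlen p (by simp)
      omega
  | succ f ih =>
    intro st hinv hlen
    cases st with
    | nil => simp [pvBLoop]
    | cons hd rest =>
      have hlev := pvBLevel_eq hne hcl (hd :: rest) hinv
      cases h : pvBLevel actions d (hd :: rest) with
      | none =>
        rw [h] at hlev
        simp only [pvBLoop, h]
        exact hlev.symm
      | some nxt =>
        rw [h] at hlev
        obtain ⟨heq, hinv', hsrc⟩ := hlev
        simp only [pvBLoop, h]
        rw [ih nxt hinv' ?_, heq]
        intro q hq
        obtain ⟨p, hp, act, hact, hq1⟩ := hsrc q hq
        have hplen := hlen p hp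
        have halen := pv_act_len_pos hne hact
        have : q.1.length = p.1.length + act.length := by
          rw [hq1, String.length_append]
        omega

-- both programs decide at the root when a -1 or a mismatch is seen there
theorem pv_depth0 {actions : List String} {d : List (String × Int)} {fa fb : Nat}
    {p1 p2 : String} (h1 : p1 ∈ d.map Prod.fst) (h2 : p2 ∈ d.map Prod.fst)
    (hc : pvGet d p1 = some (-1) ∨ pvGet d p2 = some (-1) ∨ pvGet d p1 ≠ pvGet d p2) :
    pvARec actions d (fa + 1) p1 p2 = pvBLoop actions d (fb + 1) [(p1, p2)] := by
  obtain ⟨v1, hv1⟩ := pvGet_is_some h1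
  obtain ⟨v2, hv2⟩ := pvGet_is_some h2
  by_cases e1 : v1 = -1
  · simp [pvARec, pvBLoop, pvBLevel, hv1, hv2, e1]
  · by_cases e2 : v2 = -1
    · simp [pvARec, pvBLoop, pvBLevel, hv1, hv2, e1, e2]
    · have hne12 : v1 ≠ v2 := by
        rcases hc with h | h | h
        · rw [hv1] at h; exact absurd (by simpa using h) e1
        · rw [hv2] at h; exact absurd (by simpa using h) e2
        · rw [hv1, hv2] at h; simpa using h
      simp [pvARec, pvBLoop, pvBLevel, hv1, hv2, e1, e2, hne12]

-- ===== VERDICT (by name: the statement is the Claim_ definition above) =====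
theorem compatible_test_rec_spec : Claim_equal_compatible_test_rec := by
  intro p1 p2 actions d _ hpre
  obtain ⟨h1, h2, hc⟩ := hpre
  unfold Spec_compatible_test_rec compatible_test_rec compatible_test_rec_alt
  rcases hc with h | h | h | ⟨hne, hcl⟩
  · exact pv_depth0 (fa := pvMaxLen d + 1) (fb := pvMaxLen d + 1) h1 h2 (Or.inl h)
  · exact pv_depth0 (fa := pvMaxLen d + 1) (fb := pvMaxLen d + 1) h1 h2 (Or.inr (Or.inl h))
  · exact pv_depth0 (fa := pvMaxLen d + 1) (fb := pvMaxLen d + 1) h1 h2 (Or.inr (Or.inr h))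
  · rw [pvBLoop_eq hne hcl (pvMaxLen d + 2) [(p1, p2)]
      (by intro p hp
          have hp' : p = (p1, p2) := by simpa using hp
          subst hp'
          exact ⟨h1, h2, pvPref_refl p1, pvPref_refl p2⟩)
      (by intro p hp; omega)]
    simp [pvF]
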